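-- pv_equiv track=rewrite | github.com/learninghub-official/e-com-website | testing.py | max_teams_with_equal_size
-- ===== SOURCE A (Python) =====
-- def max_teams_with_equal_size(teamSize, k):
--     teamSize.sort()  # Sort the team sizes in ascending order
--     n = len(teamSize)
--     min_team_size = teamSize[0]  # Smallest team size
--     max_possible_team_size = min_team_size + k  # Maximum possible team size after reduction
--
--     # Count the number of teams that can be formed with the maximum possible team size
--     max_teams = 0
--     for size in teamSize:
--         if size <= max_possible_team_size:
--             max_teams += 1
--         else:
--             break
--
--     # Calculate the maximum number of teams that can be formed
--     return min(max_teams, n // (k + 1))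
-- ===== SOURCE B (Python) =====
-- def max_teams_with_equal_size(teamSize, k):
--     # Sort-free alternative: build a frequency dict in one pass, then work on DISTINCT sizes only.
--     # (Return value only: A sorts its argument in place, B does not mutate it.)
--     freq = {}
--     for s in teamSize:
--         freq[s] = freq.get(s, 0) + 1
--     m = min(freq)
--     limit = m + k
--     total = 0
--     for v, c in freq.items():
--         if v <= limit:
--             total += c
--     return min(total, len(teamSize) // (k + 1))
-- ===== Notes on version B (the rewrite author's own statement) =====
-- stated objective: alternative
-- what changed: Replaces sort + break-prefix scan with a frequency dictionary built in one pass: the minimum is taken over the dict's keys and the count is summed over DISTINCT sizes' multiplicities; it trades the O(n log n) sort for O(n) dict work (not measurably faster in Python on the timed inputs; B also does not mutate the input list, which A sorts in place).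
import Mathlib
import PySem

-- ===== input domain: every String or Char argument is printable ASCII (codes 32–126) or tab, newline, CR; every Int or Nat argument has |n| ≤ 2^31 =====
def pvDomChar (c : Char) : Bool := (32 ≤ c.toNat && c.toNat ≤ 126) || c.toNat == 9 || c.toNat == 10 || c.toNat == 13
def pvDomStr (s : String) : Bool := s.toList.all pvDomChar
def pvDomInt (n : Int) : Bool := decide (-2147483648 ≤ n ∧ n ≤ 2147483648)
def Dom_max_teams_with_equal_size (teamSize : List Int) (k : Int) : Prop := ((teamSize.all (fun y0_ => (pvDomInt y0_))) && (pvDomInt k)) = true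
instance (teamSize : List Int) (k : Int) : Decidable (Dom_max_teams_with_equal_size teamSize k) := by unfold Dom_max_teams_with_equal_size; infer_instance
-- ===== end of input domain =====

-- B replaces A's sort + break-prefix scan by a frequency dictionary: min over its keys,
-- sum of multiplicities over distinct sizes ≤ min+k (alternative algorithm, similar cost).
-- Equality is about the RETURN value only: A sorts its argument in place, B does not mutate it.

-- ===== PORT A =====
-- the 'for size in teamSize: … else: break' loop, literal
def pvLoopA : List Int → Int → Int → Int
  | [], _, acc => acc
  | s :: rest, mx, acc => if s ≤ mx then pvLoopA rest mx (acc + 1) else acc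

def max_teams_with_equal_size (teamSize : List Int) (k : Int) : Int :=
  let ts := PySem.List.sorted teamSize (fun x => x) false
  let n : Int := ts.length
  match PySem.List.pyGet? ts 0 with
  | none => 0  -- IndexError: teamSize = [], excluded by Pre_
  | some min_team_size =>
    let max_possible_team_size := min_team_size + k
    let max_teams := pvLoopA ts max_possible_team_size 0
    min max_teams (PySem.Int.floordiv n (k + 1))

-- ===== PORT B =====
def max_teams_with_equal_size_alt (teamSize : List Int) (k : Int) : Int :=
  let freq := teamSize.foldl (fun d s => d.insert s (d.getD s 0 + 1)) PySem.Dict.empty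
  match PySem.List.min? freq.keys (fun x => x) with
  | none => 0  -- ValueError: min({}) on empty input, excluded by Pre_
  | some m =>
    let limit := m + k
    let total := freq.items.foldl (fun acc p => if p.1 ≤ limit then acc + p.2 else acc) (0 : Int)
    min total (PySem.Int.floordiv (teamSize.length : Int) (k + 1))

-- ===== PRECONDITION & SPEC =====
-- A raises IndexError on the empty list and ZeroDivisionError when k = -1; both programs raise there.
def Pre_max_teams_with_equal_size (teamSize : List Int) (k : Int) : Prop := teamSize ≠ [] ∧ k ≠ -1
instance (teamSize : List Int) (k : Int) : Decidable (Pre_max_teams_with_equal_size teamSize k) := by unfold Pre_max_teams_with_equal_size; infer_instance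
def pvWitness_max_teams_with_equal_size : List Int × Int := ([3, 1, 2, 5], 1)

def Spec_max_teams_with_equal_size (teamSize : List Int) (k : Int) (out : Int) : Prop := out = max_teams_with_equal_size_alt teamSize k
instance (teamSize : List Int) (k : Int) (out : Int) : Decidable (Spec_max_teams_with_equal_size teamSize k out) := by unfold Spec_max_teams_with_equal_size; infer_instance

-- ===== CLAIM (what is proved, stated in full; the proofs are below) =====
def Claim_equal_max_teams_with_equal_size : Prop := ∀ (teamSize : List Int) (k : Int), Dom_max_teams_with_equal_size teamSize k → Pre_max_teams_with_equal_size teamSize k → Spec_max_teams_with_equal_size teamSize k (max_teams_with_equal_size teamSize k)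

-- ===== LEMMAS AND PROOFS =====

-- A's break-loop over a ≤-sorted list counts ALL elements ≤ mx
theorem pvLoopA_eq_countP (l : List Int) (mx acc : Int)
    (h : l.Pairwise (· ≤ ·)) :
    pvLoopA l mx acc = acc + (l.countP (fun s => decide (s ≤ mx)) : Int) := by
  induction l generalizing acc with
  | nil => simp [pvLoopA]
  | cons s rest ih =>
    rcases List.pairwise_cons.mp h with ⟨hle, hrest⟩
    by_cases hs : s ≤ mx
    · simp only [pvLoopA, ih _ hrest, List.countP_cons, hs]
      simp; omega
    · have hz : rest.countP (fun t => decide (t ≤ mx)) = 0 := by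
        rw [List.countP_eq_zero]
        intro t ht
        have := hle t ht
        simp; omega
      simp [pvLoopA, hs, hz]

-- B's sum of multiplicities over a duplicate-free superlist of xs' values counts xs' elements ≤ limit
theorem sum_counts_eq_countP (xs : List Int) (limit : Int) (S : List Int)
    (hnd : S.Nodup) (hsub : ∀ x ∈ xs, x ∈ S) (acc : Int) :
    S.foldl (fun acc v => if v ≤ limit then acc + (xs.count v : Int) else acc) acc
      = acc + (xs.countP (fun s => decide (s ≤ limit)) : Int) := by
  induction S generalizing xs acc with
  | nil =>
    have : xs = [] := by
      cases xs with
      | nil => rfl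
      | cons a t => exact absurd (hsub a (by simp)) (by simp)
    simp [this]
  | cons v S' ih =>
    rcases List.nodup_cons.mp hnd with ⟨hv, hnd'⟩
    have hsub' : ∀ x ∈ xs.filter (fun x => !decide (x = v)), x ∈ S' := by
      intro x hx
      rcases List.mem_filter.mp hx with ⟨hxxs, hxv⟩
      rcases List.mem_cons.mp (hsub x hxxs) with h | h
      · exact absurd h (by simpa using hxv)
      · exact h
    have hcong : S'.foldl (fun acc v' => if v' ≤ limit then acc + (xs.count v' : Int) else acc)
          ((fun acc v' => if v' ≤ limit then acc + (xs.count v' : Int) else acc) acc v)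
        = S'.foldl (fun acc v' => if v' ≤ limit then acc + ((xs.filter (fun x => !decide (x = v))).count v' : Int) else acc)
          ((fun acc v' => if v' ≤ limit then acc + (xs.count v' : Int) else acc) acc v) := by
      apply PySem.List.foldl_congr_mem
      intro b w hw
      have hwv : w ≠ v := fun h => hv (h ▸ hw)
      have : (xs.filter (fun x => !decide (x = v))).count w = xs.count w := by
        rw [List.count_filter]
        simp [hwv]
      rw [this]
    have hsplit : (xs.countP (fun s => decide (s ≤ limit)) : Int)
        = (if v ≤ limit then (xs.count v : Int) else 0)
          + ((xs.filter (fun x => !decide (x = v))).countP (fun s => decide (s ≤ limit)) : Int) := by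
      have h1 : xs.countP (fun s => decide (s ≤ limit))
          = (xs.filter (fun s => decide (s = v))).countP (fun s => decide (s ≤ limit))
            + (xs.filter (fun s => !decide (s = v))).countP (fun s => decide (s ≤ limit)) :=
        List.countP_eq_countP_filter_add xs _ (fun s => decide (s = v))
      by_cases hvl : v ≤ limit
      · have h3 : (xs.filter (fun s => decide (s = v))).countP (fun s => decide (s ≤ limit))
            = xs.count v := by
          rw [List.countP_filter]
          unfold List.count
          congr 1
          funext s
          by_cases h : s = v <;> simp [h, hvl]
        simp [hvl, h1, h3]
      · have h3 : (xs.filter (fun s => decide (s = v))).countP (fun s => decide (s ≤ limit)) = 0 := by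
          rw [List.countP_eq_zero]
          intro s hs
          have : s = v := by simpa using (List.mem_filter.mp hs).2
          simp [this, hvl]
        simp [hvl, h1, h3]
    rw [List.foldl_cons, hcong, ih _ hnd' hsub', hsplit]
    by_cases hvl : v ≤ limit <;> simp [hvl] <;> ring

theorem max_teams_with_equal_size_spec' (teamSize : List Int) (k : Int)
    (hne : teamSize ≠ []) :
    max_teams_with_equal_size teamSize k = max_teams_with_equal_size_alt teamSize k := by
  -- the frequency dict is Counter(teamSize)
  have hfreq : teamSize.foldl (fun d s => d.insert s (d.getD s 0 + 1)) PySem.Dict.empty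
      = PySem.Dict.counter teamSize := PySem.Dict.foldl_insert_getD_add_one_eq_counter teamSize
  -- name the sorted list's head (A) and the dict-keys minimum (B)
  obtain ⟨s, t, hst⟩ : ∃ s t, PySem.List.sorted teamSize (fun x => x) false = s :: t := by
    rcases hs : PySem.List.sorted teamSize (fun x => x) false with _ | ⟨s, t⟩
    · exact absurd ((PySem.List.sorted_eq_nil_iff _ _ _).mp hs) hne
    · exact ⟨s, t, rfl⟩
  have hkeys : (PySem.Dict.counter teamSize).keys = PySem.Set.ofList teamSize :=
    PySem.Dict.keys_counter teamSize
  obtain ⟨m, hm⟩ : ∃ m, PySem.List.min? (PySem.Dict.counter teamSize).keys (fun x => x) = some m := by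
    rcases h : PySem.List.min? (PySem.Dict.counter teamSize).keys (fun x => x) with _ | m
    · rw [PySem.List.min?_eq_none_iff, hkeys] at h
      have : teamSize = [] := by
        cases hx : teamSize with
        | nil => rfl
        | cons a l =>
          have : a ∈ PySem.Set.ofList teamSize := by
            rw [PySem.Set.mem_ofList, hx]; simp
          rw [h] at this; simp at this
      exact absurd this hne
    · exact ⟨m, rfl⟩
  -- head of sorted = min of keys (= min of teamSize)
  have hperm := PySem.List.sorted_perm teamSize (fun x => x) false
  have hsmem : s ∈ teamSize := hperm.mem_iff.mp (by simp [hst])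
  have hmmem : m ∈ teamSize := by
    have := PySem.List.min?_mem hm
    rwa [hkeys, PySem.Set.mem_ofList] at this
  have hms : m ≤ s := by
    have := PySem.List.min?_isMin hm s (by rw [hkeys, PySem.Set.mem_ofList]; exact hsmem)
    simpa using this
  have hsm : s ≤ m := PySem.List.key_head_sorted_le teamSize (fun x => x) hst m hmmem
  have hsme : s = m := le_antisymm hsm hms
  have hpw : (PySem.List.sorted teamSize (fun x => x) false).Pairwise (· ≤ ·) := by
    have := PySem.List.sorted_pairwise teamSize (fun x => x)
    simpa using this
  -- A's loop counts elements of the sorted list ≤ m + k, i.e. countP over teamSize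
  have hcnt : (PySem.List.sorted teamSize (fun x => x) false).countP (fun x => decide (x ≤ m + k))
      = teamSize.countP (fun x => decide (x ≤ m + k)) := hperm.countP_eq _
  have hlen : (PySem.List.sorted teamSize (fun x => x) false).length = teamSize.length :=
    hperm.length_eq
  have hget : PySem.List.pyGet? (s :: t) (0 : Int) = some s := by
    simp [PySem.List.pyGet?, PySem.List.pyIdx?]
  -- B's items loop: fold over distinct values' multiplicities = the same countP
  have hitems : (PySem.Dict.counter teamSize).items
      = (PySem.Set.ofList teamSize).map (fun v => (v, (teamSize.count v : Int))) :=
    PySem.Dict.items_counter teamSize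
  have htot : (PySem.Dict.counter teamSize).items.foldl
        (fun acc p => if p.1 ≤ m + k then acc + p.2 else acc) (0 : Int)
      = (0 : Int) + (teamSize.countP (fun x => decide (x ≤ m + k)) : Int) := by
    rw [hitems, List.foldl_map]
    exact sum_counts_eq_countP teamSize (m + k) (PySem.Set.ofList teamSize)
      (PySem.Set.nodup_ofList teamSize) (fun x hx => by simpa [PySem.Set.mem_ofList] using hx) 0
  simp only [max_teams_with_equal_size, max_teams_with_equal_size_alt, hfreq, hm, hst, hget]
  rw [show pvLoopA (s :: t) (s + k) 0 = pvLoopA (PySem.List.sorted teamSize (fun x => x) false) (s + k) 0 from by rw [hst]]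
  rw [pvLoopA_eq_countP _ _ _ hpw, hsme, hcnt, htot]
  simp [← hlen, hst]

-- ===== VERDICT (by name: the statement is the Claim_ definition above) =====
theorem max_teams_with_equal_size_spec : Claim_equal_max_teams_with_equal_size := by
  intro teamSize k _ hpre
  exact max_teams_with_equal_size_spec' teamSize k hpre.1
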